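-- pv_equiv track=rewrite | github.com/Kwaku327/PowerTracker | liftingcast_loader.py | _collect_equipment
-- ===== SOURCE A (Python) =====
-- from typing import Dict, Iterable, List, Optional, Tuple
--
-- def _collect_equipment(values: Iterable[Optional[str]]) -> Optional[str]:
--     filtered = {value for value in values if value}
--     if not filtered:
--         return None
--     if len(filtered) == 1:
--         value = filtered.pop()
--         return value.title()
--     return "Mixed"
-- ===== SOURCE B (Python) =====
-- def _collect_equipment(values):
--     result = None
--     for value in values:
--         if not value:
--             continue
--         if result is None:
--             result = value
--         elif value != result:
--             return "Mixed"
--     return None if result is None else result.title()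
-- ===== Notes on version B (the rewrite author's own statement) =====
-- stated objective: simpler
-- what changed: B replaces the materialized distinct-set plus size branching with a single early-exit pass that keeps one representative value and returns 'Mixed' as soon as a second distinct truthy value appears.
import Mathlib
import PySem

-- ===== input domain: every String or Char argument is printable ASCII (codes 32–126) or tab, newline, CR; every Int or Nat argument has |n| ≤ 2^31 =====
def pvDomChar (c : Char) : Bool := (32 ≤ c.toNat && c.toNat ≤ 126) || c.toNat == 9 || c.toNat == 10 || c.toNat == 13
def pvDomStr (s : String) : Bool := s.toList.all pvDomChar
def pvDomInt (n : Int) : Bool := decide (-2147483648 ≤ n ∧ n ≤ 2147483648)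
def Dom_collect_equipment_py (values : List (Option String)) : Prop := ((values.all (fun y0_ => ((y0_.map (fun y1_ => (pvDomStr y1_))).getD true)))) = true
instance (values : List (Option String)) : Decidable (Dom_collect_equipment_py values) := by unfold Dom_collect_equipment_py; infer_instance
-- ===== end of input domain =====

-- B replaces A's materialized distinct-set + size branching with a single early-exit
-- pass keeping one representative value; same return value everywhere.

-- Python str.title(), ported by hand (exact on ASCII: a letter is uppercased iff the
-- previous character is not a letter, otherwise lowercased; other characters kept).
def pvTitleChars : Bool → List Char → List Char
  | _, [] => []
  | prev, c :: rest =>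
    if PySem.Chars.isalpha c then
      (if prev then PySem.Chars.lowerChar c else PySem.Chars.upperChar c) :: pvTitleChars true rest
    else c :: pvTitleChars false rest

def pvTitle (s : String) : String := String.ofList (pvTitleChars false s.toList)

-- ===== PORT A =====
-- one step of the set comprehension '{value for value in values if value}'
def pvStep (acc : PySem.Set String) (v : Option String) : PySem.Set String :=
  match v with
  | some s => if s = "" then acc else PySem.Set.add acc s
  | none => acc

def collect_equipment_py (values : List (Option String)) : Option String :=
  let filtered : PySem.Set String := values.foldl pvStep PySem.Set.empty
  match filtered with
  | [] => none
  | [v] => some (pvTitle v)   -- len == 1: pop yields the unique element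
  | _ => some "Mixed"

-- ===== PORT B =====
def pvAltLoop (result : Option String) : List (Option String) → Option String
  | [] => result.map pvTitle
  | v :: rest =>
    match v with
    | none => pvAltLoop result rest
    | some s =>
      if s = "" then pvAltLoop result rest
      else
        match result with
        | none => pvAltLoop (some s) rest
        | some r => if s = r then pvAltLoop result rest else some "Mixed"

def collect_equipment_py_alt (values : List (Option String)) : Option String :=
  pvAltLoop none values

-- ===== PRECONDITION & SPEC =====
def Spec_collect_equipment_py (values : List (Option String)) (out : Option String) : Prop := out = collect_equipment_py_alt values
instance (values : List (Option String)) (out : Option String) : Decidable (Spec_collect_equipment_py values out) := by unfold Spec_collect_equipment_py; infer_instance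

-- ===== CLAIM (what is proved, stated in full; the proofs are below) =====
def Claim_equal_collect_equipment_py : Prop := ∀ (values : List (Option String)), Dom_collect_equipment_py values → Spec_collect_equipment_py values (collect_equipment_py values)

-- ===== LEMMAS AND PROOFS =====
def pvInterp (acc : PySem.Set String) : Option String :=
  match acc with
  | [] => none
  | [v] => some (pvTitle v)
  | _ => some "Mixed"

theorem pvStep_length (acc : PySem.Set String) (v : Option String) :
    acc.length ≤ (pvStep acc v).length := by
  cases v with
  | none => simp [pvStep]
  | some s =>
    by_cases h : s = "" <;> simp [pvStep, h, PySem.Set.add]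
    split <;> simp

theorem pvInterp_big (values : List (Option String)) :
    ∀ acc : PySem.Set String, 2 ≤ acc.length →
      pvInterp (values.foldl pvStep acc) = some "Mixed" := by
  induction values with
  | nil =>
    intro acc h
    match acc, h with
    | a :: b :: rest, _ => simp [pvInterp]
  | cons v rest ih =>
    intro acc h
    exact ih (pvStep acc v) (le_trans h (pvStep_length acc v))

theorem pvAltLoop_some (values : List (Option String)) :
    ∀ r : String, pvAltLoop (some r) values = pvInterp (values.foldl pvStep [r]) := by
  induction values with
  | nil => intro r; simp [pvAltLoop, pvInterp]
  | cons v rest ih =>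
    intro r
    cases v with
    | none => simpa [pvAltLoop, pvStep] using ih r
    | some s =>
      by_cases he : s = ""
      · simpa [pvAltLoop, pvStep, he] using ih r
      · by_cases hr : s = r
        · have : PySem.Set.add [r] s = [r] := by
            simp [PySem.Set.add, PySem.Set.contains, hr]
          simpa [pvAltLoop, pvStep, he, hr, this] using ih r
        · have hadd : pvStep [r] (some s) = [r, s] := by
            simp [pvStep, he, PySem.Set.add, PySem.Set.contains, hr]
          simp [pvAltLoop, he, hr, hadd]
          exact (pvInterp_big rest [r, s] (by simp)).symm

theorem pvAltLoop_none (values : List (Option String)) :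
    pvAltLoop none values = pvInterp (values.foldl pvStep []) := by
  induction values with
  | nil => simp [pvAltLoop, pvInterp]
  | cons v rest ih =>
    cases v with
    | none => simpa [pvAltLoop, pvStep] using ih
    | some s =>
      by_cases he : s = ""
      · simpa [pvAltLoop, pvStep, he] using ih
      · have hadd : pvStep [] (some s) = [s] := by
          simp [pvStep, he, PySem.Set.add, PySem.Set.contains]
        simp [pvAltLoop, he, hadd, pvAltLoop_some rest s]

-- ===== VERDICT (by name: the statement is the Claim_ definition above) =====
theorem collect_equipment_py_spec : Claim_equal_collect_equipment_py := by
  intro values _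
  unfold Spec_collect_equipment_py collect_equipment_py collect_equipment_py_alt
  rw [pvAltLoop_none]
  rfl
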